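-- pv_equiv track=rewrite | github.com/rochellemtperry-hub/Animal | src/trailcam_filter/observations.py | find_observation_index
-- ===== SOURCE A (Python) =====
-- def find_observation_index(rows: list[dict[str, str]], image_path: str, file_name: str, camera_id: str) -> int | None:
--     normalized_path = image_path.strip()
--     for i, row in enumerate(rows):
--         if row.get("image_path", "").strip() == normalized_path:
--             return i
--     for i, row in enumerate(rows):
--         if row.get("file_name", "").strip() == file_name and row.get("camera_id", "").strip() == camera_id:
--             return i
--     return None
-- ===== SOURCE B (Python) =====
-- def find_observation_index(rows: list[dict[str, str]], image_path: str, file_name: str, camera_id: str) -> int | None: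
--     normalized_path = image_path.strip()
--     path_hit = None
--     fc_hit = None
--     for i, row in enumerate(rows):
--         if path_hit is None and row.get("image_path", "").strip() == normalized_path:
--             path_hit = i
--         if fc_hit is None and row.get("file_name", "").strip() == file_name and row.get("camera_id", "").strip() == camera_id:
--             fc_hit = i
--     return path_hit if path_hit is not None else fc_hit
-- ===== Notes on version B (the rewrite author's own statement) =====
-- stated objective: alternative
-- what changed: Replaces A's two sequential early-return scans with a single full fold over enumerated rows that accumulates the first path-match index and the first filename+camera-match index simultaneously, then prefers the path index after the pass.
import Mathlib
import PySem

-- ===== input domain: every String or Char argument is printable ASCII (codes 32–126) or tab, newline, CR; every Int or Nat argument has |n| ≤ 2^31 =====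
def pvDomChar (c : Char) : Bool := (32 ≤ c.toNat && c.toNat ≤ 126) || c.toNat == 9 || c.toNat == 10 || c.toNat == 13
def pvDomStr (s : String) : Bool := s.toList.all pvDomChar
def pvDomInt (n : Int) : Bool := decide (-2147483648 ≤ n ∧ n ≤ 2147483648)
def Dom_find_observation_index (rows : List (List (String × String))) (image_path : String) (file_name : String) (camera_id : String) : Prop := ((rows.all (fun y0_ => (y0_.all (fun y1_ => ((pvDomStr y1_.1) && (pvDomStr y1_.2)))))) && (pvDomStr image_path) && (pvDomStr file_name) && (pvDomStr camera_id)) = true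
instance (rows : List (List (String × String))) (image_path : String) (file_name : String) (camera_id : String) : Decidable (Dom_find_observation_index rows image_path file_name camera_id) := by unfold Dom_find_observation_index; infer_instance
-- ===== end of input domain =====

-- ===== PORT A =====
-- B folds once over the enumerated rows accumulating both first-match indices instead of A's two early-return scans; return value only (no mutation).
-- row.get(key, "") on a Python dict = first match in the association list, else ""
def pvRowGet (row : List (String × String)) (key : String) : String :=
  match row.find? (fun p => p.1 == key) with
  | some p => p.2
  | none => ""

-- first loop of A: scan for a stripped image_path match, early return
def pvFindPath (rows : List (List (String × String))) (np : String) (i : Int) : Option Int :=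
  match rows with
  | [] => none
  | r :: rs =>
    if PySem.Str.strip (pvRowGet r "image_path") == np then some i
    else pvFindPath rs np (i + 1)

-- second loop of A: scan for a file_name + camera_id match, early return
def pvFindFC (rows : List (List (String × String))) (fn cid : String) (i : Int) : Option Int :=
  match rows with
  | [] => none
  | r :: rs =>
    if PySem.Str.strip (pvRowGet r "file_name") == fn && PySem.Str.strip (pvRowGet r "camera_id") == cid then some i
    else pvFindFC rs fn cid (i + 1)

def find_observation_index (rows : List (List (String × String))) (image_path : String) (file_name : String) (camera_id : String) : Option Int :=
  match pvFindPath rows (PySem.Str.strip image_path) 0 with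
  | some i => some i
  | none => pvFindFC rows file_name camera_id 0

-- ===== PORT B =====
-- one fold over enumerate(rows): the accumulator keeps (path_hit, fc_hit), each set at most once
def pvStep (np fn cid : String) (acc : Option Int × Option Int) (p : Int × List (String × String)) : Option Int × Option Int :=
  (if acc.1.isNone && (PySem.Str.strip (PySem.Dict.getD (PySem.Dict.mk p.2) "image_path" "") == np) then some p.1 else acc.1,
   if acc.2.isNone && (PySem.Str.strip (PySem.Dict.getD (PySem.Dict.mk p.2) "file_name" "") == fn
        && PySem.Str.strip (PySem.Dict.getD (PySem.Dict.mk p.2) "camera_id" "") == cid) then some p.1 else acc.2)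

def find_observation_index_alt (rows : List (List (String × String))) (image_path : String) (file_name : String) (camera_id : String) : Option Int :=
  let res := (PySem.List.enumerate rows).foldl (pvStep (PySem.Str.strip image_path) file_name camera_id) (none, none)
  match res.1 with
  | some i => some i
  | none => res.2

-- ===== PRECONDITION & SPEC =====
def Spec_find_observation_index (rows : List (List (String × String))) (image_path : String) (file_name : String) (camera_id : String) (out : Option Int) : Prop := out = find_observation_index_alt rows image_path file_name camera_id
instance (rows : List (List (String × String))) (image_path : String) (file_name : String) (camera_id : String) (out : Option Int) : Decidable (Spec_find_observation_index rows image_path file_name camera_id out) := by unfold Spec_find_observation_index; infer_instance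

-- ===== CLAIM (what is proved, stated in full; the proofs are below) =====
def Claim_equal_find_observation_index : Prop := ∀ (rows : List (List (String × String))) (image_path : String) (file_name : String) (camera_id : String), Dom_find_observation_index rows image_path file_name camera_id → Spec_find_observation_index rows image_path file_name camera_id (find_observation_index rows image_path file_name camera_id)

-- ===== LEMMAS AND PROOFS =====
theorem pvDictGetD_eq_rowGet (row : List (String × String)) (key : String) :
    PySem.Dict.getD (PySem.Dict.mk row) key "" = pvRowGet row key := by
  simp [PySem.Dict.getD, PySem.Dict.get?, pvRowGet]
  cases List.find? (fun p => p.1 == key) row <;> rfl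

theorem pvFold_eq (rows : List (List (String × String))) (np fn cid : String) (i : Int)
    (ph fh : Option Int) :
    (PySem.List.enumerate rows i).foldl (pvStep np fn cid) (ph, fh) =
      ((match ph with | some c => some c | none => pvFindPath rows np i),
       (match fh with | some c => some c | none => pvFindFC rows fn cid i)) := by
  induction rows generalizing i ph fh with
  | nil => cases ph <;> cases fh <;> simp [PySem.List.enumerate_nil, pvFindPath, pvFindFC]
  | cons r rs ih =>
    rw [PySem.List.enumerate_cons, List.foldl_cons, ih]
    simp only [pvStep, pvFindPath, pvFindFC, pvDictGetD_eq_rowGet]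
    cases ph <;> cases fh <;> simp <;> split_ifs <;> simp_all

-- ===== VERDICT (by name: the statement is the Claim_ definition above) =====
theorem find_observation_index_spec : Claim_equal_find_observation_index := by
  intro rows image_path file_name camera_id _
  unfold Spec_find_observation_index find_observation_index find_observation_index_alt
  rw [show PySem.List.enumerate rows = PySem.List.enumerate rows 0 from rfl, pvFold_eq]
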